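-- pv_equiv track=rewrite | github.com/FELMONON/docagent-studio | src/docagent/cli.py | _first_sentences
-- ===== SOURCE A (Python) =====
-- def _first_sentences(text: str, n: int, max_chars: int) -> str:
--     t = " ".join(text.split())
--     if len(t) <= max_chars:
--         return t
--
--     # naive sentence split
--     parts = []
--     buf = ""
--     for ch in t:
--         buf += ch
--         if ch in ".!?":
--             parts.append(buf.strip())
--             buf = ""
--             if len(parts) >= n:
--                 break
--     if not parts:
--         return t[:max_chars].rstrip()
--
--     out = " ".join(parts)
--     return out[:max_chars].rstrip()
-- ===== SOURCE B (Python) =====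
-- def _first_sentences(text: str, n: int, max_chars: int) -> str:
--     t = " ".join(text.split())
--     if len(t) <= max_chars:
--         return t
--
--     # index-based: positions of sentence terminators, then slice between them
--     ends = [i for i, ch in enumerate(t) if ch in ".!?"]
--     keep = ends[:max(n, 1)]
--     if not keep:
--         return t[:max_chars].rstrip()
--
--     starts = [0] + [e + 1 for e in keep[:-1]]
--     out = " ".join(t[s:e + 1].strip() for s, e in zip(starts, keep))
--     return out[:max_chars].rstrip()
-- ===== Notes on version B (the rewrite author's own statement) =====
-- stated objective: alternative
-- what changed: Replaces A's character-accumulating buffer loop with early break by an index-based decomposition: collect the terminator positions once, keep the first max(n,1) of them, and rebuild each sentence as a slice of t between consecutive kept positions.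
import Mathlib
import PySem

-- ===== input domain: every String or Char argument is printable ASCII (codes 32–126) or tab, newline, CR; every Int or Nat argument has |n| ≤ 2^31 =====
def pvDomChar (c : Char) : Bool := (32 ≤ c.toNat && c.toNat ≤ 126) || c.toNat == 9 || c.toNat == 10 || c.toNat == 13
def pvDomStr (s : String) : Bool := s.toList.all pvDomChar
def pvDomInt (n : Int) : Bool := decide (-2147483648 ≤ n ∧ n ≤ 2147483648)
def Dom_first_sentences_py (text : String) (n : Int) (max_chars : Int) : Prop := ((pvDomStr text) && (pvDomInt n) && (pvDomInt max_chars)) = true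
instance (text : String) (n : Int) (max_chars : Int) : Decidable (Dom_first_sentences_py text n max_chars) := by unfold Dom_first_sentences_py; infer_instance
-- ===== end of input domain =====

-- B re-implements A's buffered sentence-scan as index arithmetic: terminator positions + slices
-- between them (alternative decomposition, same cost); proved to return A's exact value everywhere.

-- ch in ".!?"  (shared character test of both versions)
def pvTerm (c : Char) : Bool := c == '.' || c == '!' || c == '?'

-- ===== PORT A =====
-- the for-loop over t with early break: state = (parts, buf)
def pvALoop (n : Int) : List Char → List (List Char) → List Char → List (List Char)
  | [], parts, _buf => parts
  | c :: rest, parts, buf =>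
    let buf' := buf ++ [c]
    if pvTerm c then
      let parts' := parts ++ [PySem.Chars.strip buf']
      if n ≤ (parts'.length : Int) then parts'
      else pvALoop n rest parts' []
    else pvALoop n rest parts buf'

def first_sentences_py (text : String) (n : Int) (max_chars : Int) : String :=
  let t := PySem.Chars.join [' '] (PySem.Chars.split₀ text.toList)
  if (t.length : Int) ≤ max_chars then String.ofList t
  else
    let parts := pvALoop n t [] []
    if parts = [] then
      String.ofList (PySem.Chars.rstrip (PySem.List.slice t none (some max_chars)))
    else
      let out := PySem.Chars.join [' '] parts
      String.ofList (PySem.Chars.rstrip (PySem.List.slice out none (some max_chars)))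

-- ===== PORT B =====
def first_sentences_py_alt (text : String) (n : Int) (max_chars : Int) : String :=
  let t := PySem.Chars.join [' '] (PySem.Chars.split₀ text.toList)
  if (t.length : Int) ≤ max_chars then String.ofList t
  else
    let ends := ((PySem.List.enumerate t 0).filter (fun p => pvTerm p.2)).map (fun p => p.1)
    let keep := PySem.List.slice ends none (some (max n 1))
    if keep = [] then
      String.ofList (PySem.Chars.rstrip (PySem.List.slice t none (some max_chars)))
    else
      let starts := 0 :: (keep.dropLast.map (· + 1))
      let out := PySem.Chars.join [' ']
        ((starts.zip keep).map
          (fun p => PySem.Chars.strip (PySem.List.slice t (some p.1) (some (p.2 + 1)))))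
      String.ofList (PySem.Chars.rstrip (PySem.List.slice out none (some max_chars)))

-- ===== PRECONDITION & SPEC =====
def Spec_first_sentences_py (text : String) (n : Int) (max_chars : Int) (out : String) : Prop := out = first_sentences_py_alt text n max_chars
instance (text : String) (n : Int) (max_chars : Int) (out : String) : Decidable (Spec_first_sentences_py text n max_chars out) := by unfold Spec_first_sentences_py; infer_instance

-- ===== CLAIM (what is proved, stated in full; the proofs are below) =====
def Claim_equal_first_sentences_py : Prop := ∀ (text : String) (n : Int) (max_chars : Int), Dom_first_sentences_py text n max_chars → Spec_first_sentences_py text n max_chars (first_sentences_py text n max_chars)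

-- ===== LEMMAS AND PROOFS =====

-- proof-only spec: the raw terminator-ended segments of cs, a pending buffer buf in front
def pvSegs : List Char → List Char → List (List Char)
  | [], _ => []
  | c :: rest, buf => if pvTerm c then (buf ++ [c]) :: pvSegs rest [] else pvSegs rest (buf ++ [c])

-- proof-only spec: the (Nat) positions of the terminators of cs, offset by o
def pvEnds : List Char → Nat → List Nat
  | [], _ => []
  | c :: rest, o => if pvTerm c then o :: pvEnds rest (o + 1) else pvEnds rest (o + 1)

theorem pvSegs_eq_nil_iff (cs : List Char) (buf : List Char) :
    pvSegs cs buf = [] ↔ cs.filter pvTerm = [] := by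
  induction cs generalizing buf with
  | nil => simp [pvSegs]
  | cons c rest ih => by_cases h : pvTerm c <;> simp [pvSegs, h, ih]
theorem pvEnds_eq_nil_iff (cs : List Char) (o : Nat) :
    pvEnds cs o = [] ↔ cs.filter pvTerm = [] := by
  induction cs generalizing o with
  | nil => simp [pvEnds]
  | cons c rest ih => by_cases h : pvTerm c <;> simp [pvEnds, h, ih]

theorem pvSlices_eq (cs : List Char) (full : List Char) (s0 o k : Nat)
    (hdrop : full.drop o = cs) (hso : s0 ≤ o) (hk : 1 ≤ k) :
    ((s0 :: (((pvEnds cs o).take k).dropLast.map (· + 1))).zip ((pvEnds cs o).take k)).map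
        (fun p => (full.drop p.1).take (p.2 + 1 - p.1))
      = (pvSegs cs ((full.drop s0).take (o - s0))).take k := by
  induction cs generalizing s0 o k with
  | nil => simp [pvEnds, pvSegs]
  | cons c rest ih =>
    have hco : full[o]? = some c := by
      have h0 : (full.drop o)[0]? = some c := by rw [hdrop]; rfl
      rw [List.getElem?_drop] at h0; simpa using h0
    have hdrop' : full.drop (o + 1) = rest := by
      have h1 : full.drop (o + 1) = (full.drop o).drop 1 := by rw [List.drop_drop]
      rw [h1, hdrop]; rfl
    have hbufc : (full.drop s0).take (o + 1 - s0) = (full.drop s0).take (o - s0) ++ [c] := by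
      have he : o + 1 - s0 = (o - s0) + 1 := by omega
      rw [he, List.take_add_one, List.getElem?_drop]
      have h2 : s0 + (o - s0) = o := by omega
      rw [h2, hco]; rfl
    by_cases hterm : pvTerm c
    · simp only [pvEnds, pvSegs, hterm, if_true]
      obtain ⟨k', rfl⟩ : ∃ k', k = k' + 1 := ⟨k - 1, by omega⟩
      rw [List.take_succ_cons, List.take_succ_cons]
      rcases hE : (pvEnds rest (o + 1)).take k' with _ | ⟨e, tk'⟩
      · -- only one piece is kept: the zip collapses to the single head slice
        have hrest : (pvSegs rest []).take k' = [] := by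
          rcases Nat.eq_zero_or_pos k' with hz | hpos
          · simp [hz]
          · have hnil : pvEnds rest (o + 1) = [] := by
              by_contra hne
              rcases List.exists_cons_of_ne_nil hne with ⟨a, l, hl⟩
              rw [hl] at hE
              obtain ⟨k'', rfl⟩ : ∃ k'', k' = k'' + 1 := ⟨k' - 1, by omega⟩
              simp [List.take_succ_cons] at hE
            rw [(pvSegs_eq_nil_iff rest []).2 ((pvEnds_eq_nil_iff rest (o+1)).1 hnil)]
            simp
        rw [hrest]
        simp [hbufc]
      · -- at least two pieces: peel the head slice, recurse at offset o + 1
        have hk' : 1 ≤ k' := by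
          by_contra hz
          have h0 : k' = 0 := by omega
          rw [h0] at hE; simp at hE
        have hIH := ih (o + 1) (o + 1) k' hdrop' (le_refl _) hk'
        rw [hE] at hIH
        simp only [Nat.sub_self, List.take_zero] at hIH
        rw [List.dropLast_cons₂, List.map_cons, List.zip_cons_cons, List.map_cons, hbufc]
        exact congrArg _ hIH
    · simp only [pvEnds, pvSegs, hterm, if_false, Bool.false_eq_true]
      rw [← hbufc]
      exact ih s0 (o + 1) k hdrop' (by omega) hk

theorem pvEnds_enumerate (cs : List Char) (o : Nat) :
    ((PySem.List.enumerate cs (o : Int)).filter (fun p => pvTerm p.2)).map (fun p => p.1)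
      = (pvEnds cs o).map Int.ofNat := by
  induction cs generalizing o with
  | nil => simp [pvEnds, PySem.List.enumerate_nil]
  | cons c rest ih =>
    rw [PySem.List.enumerate_cons]
    have h1 : ((o : Int) + 1) = ((o + 1 : Nat) : Int) := by push_cast; ring
    rw [h1, List.filter_cons]
    by_cases h : pvTerm c
    · simp only [pvEnds, h, if_true, List.map_cons, ih (o+1)]
      rfl
    · simp only [pvEnds, h, if_false, Bool.false_eq_true, ih (o+1)]

theorem pvALoop_eq (n : Int) (cs : List Char) (buf : List Char) (parts : List (List Char))
    (h : parts = [] ∨ (parts.length : Int) < n) :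
    pvALoop n cs parts buf
      = parts ++ ((pvSegs cs buf).map PySem.Chars.strip).take ((max n 1).toNat - parts.length) := by
  induction cs generalizing buf parts with
  | nil => simp [pvALoop, pvSegs]
  | cons c rest ih =>
    by_cases hterm : pvTerm c
    · by_cases hbrk : n ≤ ((parts.length + 1 : Nat) : Int)
      · have hk : (max n 1).toNat - parts.length = 1 := by
          rcases h with h | h
          · subst h; simp at hbrk ⊢; omega
          · omega
        simp [pvALoop, pvSegs, hterm, hk]
        intro hx
        exfalso; push_cast at hbrk; omega
      · have hlt : ((parts ++ [PySem.Chars.strip (buf ++ [c])]).length : Int) < n := by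
          simp; push_cast at hbrk ⊢; omega
        have := ih [] (parts ++ [PySem.Chars.strip (buf ++ [c])]) (Or.inr hlt)
        have hk : (max n 1).toNat - (parts.length + 1) + 1 = (max n 1).toNat - parts.length := by
          push_cast at hbrk; omega
        simp only [pvALoop, pvSegs, hterm, if_true] at *
        rw [if_neg (by push_cast at hbrk ⊢; omega), this]
        simp [List.take_succ_cons, ← hk, List.append_assoc]
    · have := ih (buf ++ [c]) parts h
      simp [pvALoop, pvSegs, hterm, this]

theorem pvB_pieces (t : List Char) (K : Nat) (hK : 1 ≤ K) :
    (((0 : Int) :: (((((pvEnds t 0).map Int.ofNat).take K).dropLast).map (· + 1))).zip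
        (((pvEnds t 0).map Int.ofNat).take K)).map
      (fun p => PySem.Chars.strip (PySem.List.slice t (some p.1) (some (p.2 + 1))))
    = ((pvSegs t []).map PySem.Chars.strip).take K := by
  have hmt : ((pvEnds t 0).map Int.ofNat).take K = ((pvEnds t 0).take K).map Int.ofNat := by
    rw [List.map_take]
  rw [hmt]
  have hdl : (((pvEnds t 0).take K).map Int.ofNat).dropLast
      = (((pvEnds t 0).take K).dropLast).map Int.ofNat := by
    rw [List.map_dropLast]
  rw [hdl]
  have hcomp : ((((pvEnds t 0).take K).dropLast).map Int.ofNat).map (· + 1)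
      = ((((pvEnds t 0).take K).dropLast).map (· + 1)).map Int.ofNat := by
    simp [List.map_map]
    rfl
  rw [hcomp]
  have hz : ((0 : Int) :: ((((pvEnds t 0).take K).dropLast).map (· + 1)).map Int.ofNat)
      = ((0 : Nat) :: (((pvEnds t 0).take K).dropLast).map (· + 1)).map Int.ofNat := by
    simp
  rw [hz, List.zip_map, List.map_map]
  have hfun : ∀ p : Nat × Nat,
      (fun p => PySem.Chars.strip (PySem.List.slice t (some p.1) (some (p.2 + 1))))
          (Prod.map Int.ofNat Int.ofNat p)
        = PySem.Chars.strip ((t.drop p.1).take (p.2 + 1 - p.1)) := by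
    intro ⟨a, e⟩
    simp only [Prod.map]
    have h1 : (Int.ofNat e) + 1 = ((e + 1 : Nat) : Int) := by simp
    rw [h1]
    rw [show (Int.ofNat a) = ((a : Nat) : Int) from rfl]
    rw [PySem.List.slice_natCast]
  calc _ = ((((0 : Nat) :: (((pvEnds t 0).take K).dropLast).map (· + 1)).zip
            ((pvEnds t 0).take K)).map
          (fun p => (t.drop p.1).take (p.2 + 1 - p.1))).map PySem.Chars.strip := by
          rw [List.map_map]; exact List.map_congr_left (fun p _ => hfun p)
    _ = _ := by
          rw [pvSlices_eq t t 0 0 K rfl (le_refl 0) hK]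
          simp [List.map_take]

-- ===== VERDICT (by name: the statement is the Claim_ definition above) =====
theorem first_sentences_py_spec : Claim_equal_first_sentences_py := by
  intro text n max_chars _hdom
  unfold Spec_first_sentences_py first_sentences_py first_sentences_py_alt
  set t := PySem.Chars.join [' '] (PySem.Chars.split₀ text.toList) with ht
  have hmax : 1 ≤ max n 1 := le_max_right n 1
  have hK : 1 ≤ (max n 1).toNat := by omega
  by_cases hle : (t.length : Int) ≤ max_chars
  · simp only [if_pos hle]
  · simp only [if_neg hle]
    have hA : pvALoop n t [] []
        = ((pvSegs t []).map PySem.Chars.strip).take (max n 1).toNat := by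
      simpa using pvALoop_eq n t [] [] (Or.inl rfl)
    have hends : ((PySem.List.enumerate t 0).filter (fun p => pvTerm p.2)).map (fun p => p.1)
        = (pvEnds t 0).map Int.ofNat := by
      simpa using pvEnds_enumerate t 0
    have hkeep : PySem.List.slice
          (((PySem.List.enumerate t 0).filter (fun p => pvTerm p.2)).map (fun p => p.1))
          none (some (max n 1))
        = ((pvEnds t 0).map Int.ofNat).take (max n 1).toNat := by
      rw [hends]
      exact PySem.List.slice_to _ (by omega)
    rw [hkeep, hA]
    by_cases hemp : t.filter pvTerm = []
    · rw [(pvSegs_eq_nil_iff t []).2 hemp, (pvEnds_eq_nil_iff t 0).2 hemp]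
      simp
    · have h1 : ¬ ((pvSegs t []).map PySem.Chars.strip).take (max n 1).toNat = [] := by
        simp [List.take_eq_nil_iff, pvSegs_eq_nil_iff, hemp]
      have h2 : ¬ ((pvEnds t 0).map Int.ofNat).take (max n 1).toNat = [] := by
        simp [List.take_eq_nil_iff, pvEnds_eq_nil_iff, hemp]
      rw [if_neg h1, if_neg h2, pvB_pieces t (max n 1).toNat hK]
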